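-- pv_equiv track=rewrite | github.com/tejasborde/DSA-Problems | Matrix/Problem-3.py | countNumbersLessThanMid
-- ===== SOURCE A (Python) =====
-- def countNumbersLessThanMid(row,target):
--     low=0
--     high=len(row)-1
--
--     while(low<=high):
--         mid=(low+high)//2
--
--         if(row[mid]<=target):
--             low=mid+1
--         else:
--             high=mid-1
--
--     return low
-- ===== SOURCE B (Python) =====
-- def countNumbersLessThanMid(row, target):
--     # Recursive divide-and-conquer on sub-lists: the current search segment is
--     # an actual slice of the row, and `base` is its offset in the original row.
--     def go(seg, base):
--         if not seg:
--             return base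
--         m = (len(seg) - 1) // 2
--         if seg[m] <= target:
--             return go(seg[m + 1:], base + m + 1)
--         return go(seg[:m], base)
--     return go(row, 0)
-- ===== Notes on version B (the rewrite author's own statement) =====
-- stated objective: alternative
-- what changed: Replaces the iterative low/high index bookkeeping with a recursive divide-and-conquer over actual sub-list slices plus an offset accumulator; it inspects the same midpoints in the same order on every input.
import Mathlib
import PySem

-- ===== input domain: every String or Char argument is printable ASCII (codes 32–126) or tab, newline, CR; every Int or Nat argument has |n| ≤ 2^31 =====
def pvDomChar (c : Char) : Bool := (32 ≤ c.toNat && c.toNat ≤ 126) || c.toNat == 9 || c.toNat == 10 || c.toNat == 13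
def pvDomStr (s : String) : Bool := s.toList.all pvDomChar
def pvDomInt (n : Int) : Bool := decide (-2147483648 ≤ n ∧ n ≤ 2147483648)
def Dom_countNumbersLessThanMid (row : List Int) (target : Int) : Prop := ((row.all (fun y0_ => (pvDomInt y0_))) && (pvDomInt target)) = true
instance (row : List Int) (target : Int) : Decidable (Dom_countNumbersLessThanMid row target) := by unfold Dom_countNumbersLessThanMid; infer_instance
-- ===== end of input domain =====

-- B replaces A's iterative low/high index loop by a recursive divide-and-conquer on
-- sub-list slices with an offset accumulator; same midpoints visited, same result.

-- ===== PORT A =====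
-- the while loop of A, as structural recursion on the shrinking interval [low, high]
def pvLoopA (row : List Int) (target : Int) (low high : Int) : Int :=
  if h : low ≤ high then
    let mid := PySem.Int.floordiv (low + high) 2
    match PySem.List.pyGet? row mid with
    | some v =>
        if v ≤ target then pvLoopA row target (mid + 1) high
        else pvLoopA row target low (mid - 1)
    | none => low   -- row[mid] out of range: unreachable, the loop keeps 0 ≤ low ≤ mid ≤ high < len row
  else low
termination_by (high + 1 - low).toNat
decreasing_by
  · have := PySem.Int.floordiv_two_mid_bounds h; omega
  · have := PySem.Int.floordiv_two_mid_bounds h; omega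

def countNumbersLessThanMid (row : List Int) (target : Int) : Int :=
  pvLoopA row target 0 ((row.length : Int) - 1)

-- ===== PORT B =====
-- Source B's recursive helper go(seg, base); the Python slices seg[m+1:] / seg[:m] have
-- nonnegative in-range bounds, so List.drop / List.take are exact here.
def pvGoB (target : Int) (seg : List Int) (base : Int) : Int :=
  if h : seg.isEmpty then base
  else
    let m : Nat := (seg.length - 1) / 2
    match PySem.List.pyGet? seg (m : Int) with
    | some v =>
        if v ≤ target then pvGoB target (seg.drop (m + 1)) (base + ((m : Int) + 1))
        else pvGoB target (seg.take m) base
    | none => base   -- unreachable: 0 ≤ m < seg.length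
termination_by seg.length
decreasing_by
  · have hne : seg ≠ [] := by simpa [List.isEmpty_iff] using h
    have : 0 < seg.length := List.length_pos_of_ne_nil hne
    simp [List.length_drop]; omega
  · have hne : seg ≠ [] := by simpa [List.isEmpty_iff] using h
    have : 0 < seg.length := List.length_pos_of_ne_nil hne
    simp [List.length_take]; omega

def countNumbersLessThanMid_alt (row : List Int) (target : Int) : Int :=
  pvGoB target row 0

-- ===== PRECONDITION & SPEC =====
def Spec_countNumbersLessThanMid (row : List Int) (target : Int) (out : Int) : Prop := out = countNumbersLessThanMid_alt row target
instance (row : List Int) (target : Int) (out : Int) : Decidable (Spec_countNumbersLessThanMid row target out) := by unfold Spec_countNumbersLessThanMid; infer_instance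

-- ===== CLAIM (what is proved, stated in full; the proofs are below) =====
def Claim_equal_countNumbersLessThanMid : Prop := ∀ (row : List Int) (target : Int), Dom_countNumbersLessThanMid row target → Spec_countNumbersLessThanMid row target (countNumbersLessThanMid row target)

-- ===== LEMMAS AND PROOFS =====

-- Loop/recursion correspondence: on the interval [low, high] (0 ≤ low, high < len row),
-- A's loop equals B's recursion on the slice row[low : high+1] with offset low.
lemma pvLoopA_eq_pvGoB (row : List Int) (target : Int) :
    ∀ n (low high : Int), (high + 1 - low).toNat = n → 0 ≤ low → high < (row.length : Int) →
      pvLoopA row target low high = pvGoB target ((row.drop low.toNat).take n) low := by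
  intro n
  induction n using Nat.strong_induction_on with
  | _ n ih =>
    intro low high hn hlow hhigh
    by_cases hle : low ≤ high
    · -- interval nonempty
      have hmid := PySem.Int.floordiv_two_mid_bounds hle
      have hfd : PySem.Int.floordiv (low + high) 2 = (low + high) / 2 :=
        PySem.Int.floordiv_eq_ediv_of_pos (by omega)
      have hseglen : ((row.drop low.toNat).take n).length = n := by
        simp [List.length_take, List.length_drop]; omega
      have hn1 : 1 ≤ n := by omega
      have hm : low + (((n - 1) / 2 : Nat) : Int) = (low + high) / 2 := by omega
      obtain ⟨v, hv⟩ : ∃ v, row[((low + high) / 2).toNat]? = some v :=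
        ⟨_, List.getElem?_eq_getElem (by omega)⟩
      have hgetA : PySem.List.pyGet? row (PySem.Int.floordiv (low + high) 2) = some v := by
        rw [hfd, PySem.List.pyGet?_of_nonneg row (by omega), hv]
      have hgetB : PySem.List.pyGet? ((row.drop low.toNat).take n) ((((n - 1) / 2 : Nat)) : Int)
          = some v := by
        rw [PySem.List.pyGet?_natCast, List.getElem?_take_of_lt (by omega), List.getElem?_drop,
          show low.toNat + (n - 1) / 2 = ((low + high) / 2).toNat by omega, hv]
      rw [pvLoopA, dif_pos hle]
      rw [pvGoB, dif_neg (by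
        simp only [List.isEmpty_iff]
        intro hnil; rw [hnil] at hseglen; simp at hseglen; omega)]
      simp only [hseglen, hgetA, hgetB]
      rw [hfd]
      by_cases hvt : v ≤ target
      · rw [if_pos hvt, if_pos hvt]
        rw [ih (n - ((n - 1) / 2 + 1)) (by omega) ((low + high) / 2 + 1) high
          (by omega) (by omega) hhigh]
        congr 1
        · rw [List.drop_take, List.drop_drop,
            show low.toNat + ((n - 1) / 2 + 1) = ((low + high) / 2 + 1).toNat by omega]
        · omega
      · rw [if_neg hvt, if_neg hvt]
        rw [ih ((n - 1) / 2) (by omega) low ((low + high) / 2 - 1)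
          (by omega) hlow (by omega)]
        rw [List.take_take, show min ((n - 1) / 2) n = (n - 1) / 2 by omega]
    · -- interval empty: both return low
      have hn0 : n = 0 := by omega
      rw [pvLoopA, dif_neg hle, hn0]
      rw [pvGoB, dif_pos (by simp)]

-- ===== VERDICT (by name: the statement is the Claim_ definition above) =====
theorem countNumbersLessThanMid_spec : Claim_equal_countNumbersLessThanMid := by
  intro row target _
  unfold Spec_countNumbersLessThanMid countNumbersLessThanMid countNumbersLessThanMid_alt
  have h := pvLoopA_eq_pvGoB row target row.length 0 ((row.length : Int) - 1)
    (by omega) (by omega) (by omega)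
  simpa using h
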